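-- pv_equiv track=rewrite | github.com/jkibler0590/software-supply-chain-monitor | ecosystems/pypi/pypi_scanner.py | _check_character_substitution
-- ===== SOURCE A (Python) =====
-- def _check_character_substitution(name1: str, name2: str) -> bool:
--     """Check for common character substitutions (0/o, 1/l, etc.)."""
--     if len(name1) != len(name2):
--         return False
--
--     substitutions = {
--         '0': 'o', 'o': '0',
--         '1': 'l', 'l': '1', 'i': '1',
--         '5': 's', 's': '5',
--         'u': 'v', 'v': 'u',
--         'r': 'n', 'n': 'r'
--     }
--
--     differences = 0
--     for c1, c2 in zip(name1, name2):
--         if c1 != c2: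
--             if substitutions.get(c1) != c2 and substitutions.get(c2) != c1:
--                 return False
--             differences += 1
--
--     return differences == 1
-- ===== SOURCE B (Python) =====
-- def _check_character_substitution(name1: str, name2: str) -> bool:
--     """Check for common character substitutions (0/o, 1/l, etc.)."""
--     if len(name1) != len(name2):
--         return False
--
--     substitutions = {
--         '0': 'o', 'o': '0',
--         '1': 'l', 'l': '1', 'i': '1',
--         '5': 's', 's': '5',
--         'u': 'v', 'v': 'u',
--         'r': 'n', 'n': 'r'
--     }
--
--     # find the first position where the names differ
--     n = len(name1)
--     i = 0
--     while i < n and name1[i] == name2[i]: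
--         i += 1
--     if i == n:
--         return False  # identical names: no substitution happened
--     # everything after the first mismatch must be identical (only one diff)
--     if name1[i + 1:] != name2[i + 1:]:
--         return False
--     c1, c2 = name1[i], name2[i]
--     return substitutions.get(c1) == c2 or substitutions.get(c2) == c1
-- ===== Notes on version B (the rewrite author's own statement) =====
-- stated objective: alternative
-- what changed: B scans for the FIRST mismatching position, then decides by one suffix-equality comparison that no further mismatch exists and validates only that single pair against the table, instead of A's full pass that counts every mismatch and validates each one inside the loop.
import Mathlib
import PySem

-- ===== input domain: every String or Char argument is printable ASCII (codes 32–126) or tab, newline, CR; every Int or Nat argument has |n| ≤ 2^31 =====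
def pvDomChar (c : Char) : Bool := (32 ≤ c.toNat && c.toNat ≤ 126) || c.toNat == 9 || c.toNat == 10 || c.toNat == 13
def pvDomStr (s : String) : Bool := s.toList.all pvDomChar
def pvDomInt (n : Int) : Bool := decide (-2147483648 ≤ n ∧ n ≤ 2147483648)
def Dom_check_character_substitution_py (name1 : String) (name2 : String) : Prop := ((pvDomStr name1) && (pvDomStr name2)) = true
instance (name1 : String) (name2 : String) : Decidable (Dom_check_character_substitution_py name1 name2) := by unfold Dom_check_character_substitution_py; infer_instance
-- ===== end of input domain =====

-- B finds the first mismatch, checks the suffixes are equal, and validates only that one pair; A counts and validates every mismatch in one pass (objective: alternative decomposition).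

-- the substitutions dict, shared table of both Pythons
def pvSubs : PySem.Dict Char Char :=
  PySem.Dict.ofList [('0','o'),('o','0'),('1','l'),('l','1'),('i','1'),
                     ('5','s'),('s','5'),('u','v'),('v','u'),('r','n'),('n','r')]

-- ===== PORT A =====
-- A's loop over zip(name1,name2) with the running `differences` counter and early return False
def pvLoopA : List (Char × Char) → Int → Bool
  | [], d => d == 1
  | (c1, c2) :: rest, d =>
    if c1 ≠ c2 then
      if pvSubs.get? c1 ≠ some c2 ∧ pvSubs.get? c2 ≠ some c1 then false
      else pvLoopA rest (d + 1)
    else pvLoopA rest d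

def check_character_substitution_py (name1 : String) (name2 : String) : Bool :=
  if name1.toList.length ≠ name2.toList.length then false
  else pvLoopA (List.zip name1.toList name2.toList) 0

-- ===== PORT B =====
-- B's while loop advancing past equal characters: returns the first mismatching pair
-- together with the two remaining suffixes (name1[i+1:], name2[i+1:]), or none if no mismatch
def pvFindDiff : List Char → List Char → Option (Char × Char × List Char × List Char)
  | c1 :: t1, c2 :: t2 => if c1 = c2 then pvFindDiff t1 t2 else some (c1, c2, t1, t2)
  | _, _ => none

def check_character_substitution_py_alt (name1 : String) (name2 : String) : Bool :=
  if name1.toList.length ≠ name2.toList.length then false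
  else
    match pvFindDiff name1.toList name2.toList with
    | none => false
    | some (c1, c2, t1, t2) =>
      if t1 ≠ t2 then false
      else pvSubs.get? c1 == some c2 || pvSubs.get? c2 == some c1

-- ===== PRECONDITION & SPEC =====
def Spec_check_character_substitution_py (name1 : String) (name2 : String) (out : Bool) : Prop := out = check_character_substitution_py_alt name1 name2
instance (name1 : String) (name2 : String) (out : Bool) : Decidable (Spec_check_character_substitution_py name1 name2 out) := by unfold Spec_check_character_substitution_py; infer_instance

-- ===== CLAIM (what is proved, stated in full; the proofs are below) =====
def Claim_equal_check_character_substitution_py : Prop := ∀ (name1 : String) (name2 : String), Dom_check_character_substitution_py name1 name2 → Spec_check_character_substitution_py name1 name2 (check_character_substitution_py name1 name2)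

-- ===== LEMMAS AND PROOFS =====
-- once the counter is ≥ 2, A's loop can only return false
theorem pvLoopA_ge_two (l : List (Char × Char)) : ∀ d : Int, 2 ≤ d → pvLoopA l d = false := by
  induction l with
  | nil => intro d hd; simp [pvLoopA]; omega
  | cons hd tl ih =>
      intro d hd2
      obtain ⟨c1, c2⟩ := hd
      by_cases h : c1 = c2
      · simp [pvLoopA, h]; exact ih d hd2
      · by_cases hv : pvSubs.get? c1 ≠ some c2 ∧ pvSubs.get? c2 ≠ some c1
        · simp [pvLoopA, h, hv]
        · simp [pvLoopA, h, hv]; exact ih (d + 1) (by omega)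

-- with the counter at 1, A's loop returns true exactly when no further mismatch exists
theorem pvLoopA_one (l : List (Char × Char)) :
    pvLoopA l 1 = l.all (fun p => p.1 == p.2) := by
  induction l with
  | nil => simp [pvLoopA]
  | cons hd tl ih =>
      obtain ⟨c1, c2⟩ := hd
      by_cases h : c1 = c2
      · simp [pvLoopA, h, ih]
      · by_cases hv : pvSubs.get? c1 ≠ some c2 ∧ pvSubs.get? c2 ≠ some c1
        · simp [pvLoopA, h, hv]
        · simp [pvLoopA, h, hv]
          rw [pvLoopA_ge_two tl 2 (by omega)]; simp [h]

-- for equal-length lists, list equality is pairwise equality of the zip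
theorem pvEq_zip_all (l1 : List Char) : ∀ l2 : List Char, l1.length = l2.length →
    decide (l1 = l2) = (l1.zip l2).all (fun p => p.1 == p.2) := by
  induction l1 with
  | nil => intro l2 h; cases l2 <;> simp_all
  | cons c1 t1 ih =>
      intro l2 h
      cases l2 with
      | nil => simp at h
      | cons c2 t2 =>
          by_cases hc : c1 = c2
          · simp [hc, ih t2 (by simpa using h)]
          · simp [hc]

-- A's loop started at 0 equals B's first-mismatch decomposition (equal-length lists)
theorem pvLoopA_eq_alt (l1 : List Char) : ∀ l2 : List Char, l1.length = l2.length →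
    pvLoopA (l1.zip l2) 0 =
      (match pvFindDiff l1 l2 with
        | none => false
        | some (c1, c2, t1, t2) =>
          if t1 ≠ t2 then false
          else pvSubs.get? c1 == some c2 || pvSubs.get? c2 == some c1) := by
  induction l1 with
  | nil => intro l2 h; cases l2 <;> simp_all [pvLoopA, pvFindDiff]
  | cons c1 t1 ih =>
      intro l2 h
      cases l2 with
      | nil => simp at h
      | cons c2 t2 =>
          have hlen : t1.length = t2.length := by simpa using h
          by_cases hc : c1 = c2
          · simp only [List.zip_cons_cons, pvLoopA, pvFindDiff, if_pos hc]
            simp [hc, ih t2 hlen]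
          · simp only [List.zip_cons_cons, pvLoopA, pvFindDiff, if_neg hc]
            rw [if_pos hc]
            by_cases hv : pvSubs.get? c1 ≠ some c2 ∧ pvSubs.get? c2 ≠ some c1
            · have : (pvSubs.get? c1 == some c2 || pvSubs.get? c2 == some c1) = false := by
                simp [hv.1, hv.2]
              simp [hv, this]
            · rw [if_neg hv]; norm_num; rw [pvLoopA_one, ← pvEq_zip_all t1 t2 hlen]
              have : (pvSubs.get? c1 == some c2 || pvSubs.get? c2 == some c1) = true := by
                rcases not_and_or.mp hv with h1 | h1 <;> simp [not_not.mp h1]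
              by_cases ht : t1 = t2 <;> simp [ht, this]

-- ===== VERDICT (by name: the statement is the Claim_ definition above) =====
theorem check_character_substitution_py_spec : Claim_equal_check_character_substitution_py := by
  intro name1 name2 _
  unfold Spec_check_character_substitution_py
  unfold check_character_substitution_py check_character_substitution_py_alt
  by_cases h : name1.toList.length ≠ name2.toList.length
  · rw [if_pos h, if_pos h]
  · rw [if_neg h, if_neg h, pvLoopA_eq_alt _ _ (not_ne_iff.mp h)]
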